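-- pv_equiv track=rewrite | github.com/Phantastic-AI/openclaw-trace | scripts/run_research_brief.py | _split_template
-- ===== SOURCE A (Python) =====
-- def _split_template(template_text: str) -> tuple[list[str], list[dict[str, str]]]:
--     lines = template_text.splitlines()
--     preamble: list[str] = []
--     sections: list[dict[str, str]] = []
--     current: dict[str, str] | None = None
--     body_lines: list[str] = []
--     for line in lines:
--         if line.startswith("## "):
--             if current is not None:
--                 current["body"] = "\n".join(body_lines).rstrip()
--                 sections.append(current)
--             current = {"heading": line.strip(), "body": ""}
--             body_lines = []
--             continue
--         if current is None:
--             preamble.append(line)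
--         else:
--             body_lines.append(line)
--     if current is not None:
--         current["body"] = "\n".join(body_lines).rstrip()
--         sections.append(current)
--     return preamble, sections
-- ===== SOURCE B (Python) =====
-- def _take_until_heading(lines):
--     """Split lines into (lines before the first '## ' heading, rest from that heading)."""
--     for i, line in enumerate(lines):
--         if line.startswith("## "):
--             return lines[:i], lines[i:]
--     return lines, []
--
--
-- def _split_template(template_text: str) -> tuple[list[str], list[dict[str, str]]]:
--     preamble, rest = _take_until_heading(template_text.splitlines())
--     sections: list[dict[str, str]] = []
--     while rest:
--         heading = rest[0]
--         body, rest = _take_until_heading(rest[1:])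
--         sections.append({"heading": heading.strip(), "body": "\n".join(body).rstrip()})
--     return preamble, sections
-- ===== Notes on version B (the rewrite author's own statement) =====
-- stated objective: alternative
-- what changed: Replaced the single-pass accumulator state machine (current dict + body_lines flushed on each heading) by a split-at-first-heading helper applied repeatedly: preamble = lines before the first heading, then each section is heading + lines up to the next heading.
import Mathlib
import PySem

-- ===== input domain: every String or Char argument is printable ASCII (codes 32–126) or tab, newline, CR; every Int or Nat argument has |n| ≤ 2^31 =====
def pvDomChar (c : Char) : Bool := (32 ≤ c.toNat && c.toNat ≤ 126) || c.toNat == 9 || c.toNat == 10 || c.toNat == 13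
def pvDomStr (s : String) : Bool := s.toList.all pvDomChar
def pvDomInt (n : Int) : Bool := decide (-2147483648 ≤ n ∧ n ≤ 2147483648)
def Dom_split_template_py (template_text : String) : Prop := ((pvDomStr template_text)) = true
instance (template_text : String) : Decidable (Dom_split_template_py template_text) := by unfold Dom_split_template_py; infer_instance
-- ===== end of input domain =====

-- B is an alternative decomposition of A (split at first heading, applied repeatedly) of the same cost.

-- ===== PORT A =====
-- A's for-loop, as structural recursion over the lines with the loop state
-- (preamble, sections, current, body_lines); the trailing flush is the [] case of `cur`.
def pvALoop (lines : List String) (pre : List String)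
    (secs : List (PySem.Dict String String)) (cur : Option (PySem.Dict String String))
    (body : List String) : List String × List (PySem.Dict String String) :=
  match lines with
  | [] =>
    match cur with
    | some c => (pre, secs ++ [c.insert "body" (PySem.Str.rstrip (PySem.Str.join "\n" body))])
    | none => (pre, secs)
  | l :: rest =>
    if PySem.Str.startswith l "## " then
      match cur with
      | some c =>
        pvALoop rest pre (secs ++ [c.insert "body" (PySem.Str.rstrip (PySem.Str.join "\n" body))])
          (some (PySem.Dict.ofList [("heading", PySem.Str.strip l), ("body", "")])) []
      | none =>
        pvALoop rest pre secs
          (some (PySem.Dict.ofList [("heading", PySem.Str.strip l), ("body", "")])) []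
    else
      match cur with
      | none => pvALoop rest (pre ++ [l]) secs cur body
      | some _ => pvALoop rest pre secs cur (body ++ [l])

def split_template_py (template_text : String) : List String × (List (List (String × String))) :=
  let r := pvALoop (PySem.Str.splitlines template_text) [] [] none []
  (r.1, r.2.map (·.items))

-- ===== PORT B =====
-- B's _take_until_heading: (lines before the first '## ' heading, rest from it).
def pvTakeDrop (lines : List String) : List String × List String :=
  match lines with
  | [] => ([], [])
  | l :: rest =>
    if PySem.Str.startswith l "## " then ([], l :: rest)
    else
      let r := pvTakeDrop rest
      (l :: r.1, r.2)

theorem pvTakeDrop_snd_len (lines : List String) : (pvTakeDrop lines).2.length ≤ lines.length := by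
  induction lines with
  | nil => simp [pvTakeDrop]
  | cons l rest ih =>
    simp only [pvTakeDrop]
    split
    · simp
    · simpa using Nat.le_succ_of_le ih

-- B's while-loop over `rest`: one section per iteration.
def pvBSections (rest : List String) : List (List (String × String)) :=
  match h : rest with
  | [] => []
  | heading :: tl =>
    let p := pvTakeDrop tl
    [("heading", PySem.Str.strip heading),
     ("body", PySem.Str.rstrip (PySem.Str.join "\n" p.1))] :: pvBSections p.2
  termination_by rest.length
  decreasing_by
    simpa [h] using Nat.lt_succ_of_le (pvTakeDrop_snd_len tl)

def split_template_py_alt (template_text : String) : List String × (List (List (String × String))) :=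
  let p := pvTakeDrop (PySem.Str.splitlines template_text)
  (p.1, pvBSections p.2)

-- ===== PRECONDITION & SPEC =====
def Spec_split_template_py (template_text : String) (out : List String × (List (List (String × String)))) : Prop := out = split_template_py_alt template_text
instance (template_text : String) (out : List String × (List (List (String × String)))) : Decidable (Spec_split_template_py template_text out) := by unfold Spec_split_template_py; infer_instance

-- ===== CLAIM (what is proved, stated in full; the proofs are below) =====
def Claim_equal_split_template_py : Prop := ∀ (template_text : String), Dom_split_template_py template_text → Spec_split_template_py template_text (split_template_py template_text)

-- ===== LEMMAS AND PROOFS =====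

-- A's section dicts at the list-of-pairs level.
def pvDSections (rest : List String) : List (PySem.Dict String String) :=
  match h : rest with
  | [] => []
  | heading :: tl =>
    let p := pvTakeDrop tl
    (PySem.Dict.ofList [("heading", PySem.Str.strip heading), ("body", "")]).insert "body"
        (PySem.Str.rstrip (PySem.Str.join "\n" p.1)) :: pvDSections p.2
  termination_by rest.length
  decreasing_by
    simpa [h] using Nat.lt_succ_of_le (pvTakeDrop_snd_len tl)

theorem pvFlush (h b : String) :
    ((PySem.Dict.ofList [("heading", h), ("body", "")]).insert "body" b).items
      = [("heading", h), ("body", b)] := by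
  rfl

theorem pvDSections_items (rest : List String) :
    (pvDSections rest).map (·.items) = pvBSections rest := by
  induction rest using pvDSections.induct with
  | case1 => rw [pvDSections, pvBSections]; rfl
  | case2 heading tl p hp =>
    rw [pvDSections, pvBSections]
    simp only [List.map_cons, pvFlush]
    exact congrArg _ hp

theorem pvALoop_some (lines : List String) (pre : List String)
    (secs : List (PySem.Dict String String)) (c : PySem.Dict String String)
    (body : List String) :
    pvALoop lines pre secs (some c) body =
      (pre, secs ++ (c.insert "body"
          (PySem.Str.rstrip (PySem.Str.join "\n" (body ++ (pvTakeDrop lines).1))))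
        :: pvDSections (pvTakeDrop lines).2) := by
  induction lines generalizing secs c body with
  | nil => rw [pvALoop, pvDSections.eq_def]; simp [pvTakeDrop]
  | cons l rest ih =>
    by_cases hl : PySem.Str.startswith l "## " = true
    · rw [pvALoop]
      simp only [hl, if_pos, pvTakeDrop, ih]
      rw [pvDSections]
      simp [List.append_assoc]
    · rw [pvALoop]
      simp only [hl, if_neg, Bool.false_eq_true, not_false_iff, ih, pvTakeDrop]
      simp [List.append_assoc]

theorem pvALoop_none (lines : List String) (pre : List String)
    (secs : List (PySem.Dict String String)) :
    pvALoop lines pre secs none [] =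
      (pre ++ (pvTakeDrop lines).1, secs ++ pvDSections (pvTakeDrop lines).2) := by
  induction lines generalizing pre with
  | nil => simp [pvALoop, pvTakeDrop, pvDSections]
  | cons l rest ih =>
    by_cases hl : PySem.Str.startswith l "## " = true
    · rw [pvALoop]
      simp only [hl, if_pos, pvALoop_some, pvTakeDrop]
      rw [pvDSections]
      simp
    · rw [pvALoop]
      simp only [hl, if_neg, Bool.false_eq_true, not_false_iff, ih, pvTakeDrop]
      simp

-- ===== VERDICT (by name: the statement is the Claim_ definition above) =====
theorem split_template_py_spec : Claim_equal_split_template_py := by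
  intro t _
  unfold Spec_split_template_py split_template_py split_template_py_alt
  simp [pvALoop_none, pvDSections_items]
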